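-- pv_equiv track=rewrite | github.com/paiml/depyler | examples/hard_lang_peg.py | peg_parse
-- ===== SOURCE A (Python) =====
-- from typing import List, Tuple
--
-- def peg_parse(tokens: List[int], grammar: List[List[int]]) -> bool:
--     pos: int = 0
--     for rule in grammar:
--         for expected in rule:
--             if pos < len(tokens) and tokens[pos] == expected:
--                 pos = pos + 1
--             else:
--                 return False
--     return pos == len(tokens)
-- ===== SOURCE B (Python) =====
-- from typing import List
--
-- def peg_parse(tokens: List[int], grammar: List[List[int]]) -> bool:
--     flat = [e for rule in grammar for e in rule]
--     return flat == tokens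
-- ===== Notes on version B (the rewrite author's own statement) =====
-- stated objective: simpler
-- what changed: Replaces A's interleaved position-pointer walk with early returns by flattening the grammar into one expected sequence and comparing it to tokens with list equality.
import Mathlib
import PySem

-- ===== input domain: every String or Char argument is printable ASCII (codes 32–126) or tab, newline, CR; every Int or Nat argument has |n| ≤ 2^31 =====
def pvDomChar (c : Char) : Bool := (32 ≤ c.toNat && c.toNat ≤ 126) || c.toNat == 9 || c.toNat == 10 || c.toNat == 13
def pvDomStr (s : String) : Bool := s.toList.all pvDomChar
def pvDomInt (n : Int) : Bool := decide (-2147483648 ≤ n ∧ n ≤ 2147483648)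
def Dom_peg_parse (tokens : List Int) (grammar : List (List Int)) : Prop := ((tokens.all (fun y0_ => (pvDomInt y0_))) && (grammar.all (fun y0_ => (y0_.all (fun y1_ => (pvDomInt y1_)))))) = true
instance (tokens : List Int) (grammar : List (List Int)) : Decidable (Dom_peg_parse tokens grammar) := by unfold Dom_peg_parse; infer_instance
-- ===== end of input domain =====

-- B replaces A's position-pointer walk over the grammar by flattening the grammar and comparing it to tokens with list equality (objective: simpler; same cost).


-- ===== PORT A =====
-- inner loop of A: walk one rule, advancing pos; none = early `return False`
def pegInner (tokens : List Int) (pos : Nat) : List Int → Option Nat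
  | [] => some pos
  | expected :: rest =>
    if pos < tokens.length ∧ tokens[pos]? = some expected then
      pegInner tokens (pos + 1) rest
    else
      none

-- outer loop of A over the rules
def pegOuter (tokens : List Int) (pos : Nat) : List (List Int) → Option Nat
  | [] => some pos
  | rule :: rest =>
    match pegInner tokens pos rule with
    | none => none
    | some p => pegOuter tokens p rest

def peg_parse (tokens : List Int) (grammar : List (List Int)) : Bool :=
  match pegOuter tokens 0 grammar with
  | none => false
  | some pos => decide (pos = tokens.length)

-- ===== PORT B =====
def peg_parse_alt (tokens : List Int) (grammar : List (List Int)) : Bool :=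
  decide (grammar.flatMap id = tokens)

-- ===== PRECONDITION & SPEC =====
def Spec_peg_parse (tokens : List Int) (grammar : List (List Int)) (out : Bool) : Prop := out = peg_parse_alt tokens grammar
instance (tokens : List Int) (grammar : List (List Int)) (out : Bool) : Decidable (Spec_peg_parse tokens grammar out) := by unfold Spec_peg_parse; infer_instance

-- ===== CLAIM (what is proved, stated in full; the proofs are below) =====
def Claim_equal_peg_parse : Prop := ∀ (tokens : List Int) (grammar : List (List Int)), Dom_peg_parse tokens grammar → Spec_peg_parse tokens grammar (peg_parse tokens grammar)

-- ===== LEMMAS AND PROOFS =====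

theorem pegInner_eq (rule : List Int) (tokens : List Int) (n : Nat) (hn : n ≤ tokens.length) :
    pegInner tokens n rule =
      if rule <+: tokens.drop n then some (n + rule.length) else none := by
  induction rule generalizing n with
  | nil => simp [pegInner]
  | cons e rest ih =>
    by_cases h : n < tokens.length ∧ tokens[n]? = some e
    · have hdrop : tokens.drop n = e :: tokens.drop (n + 1) := by
        rw [List.drop_eq_getElem_cons h.1]
        have := h.2
        simp [List.getElem?_eq_getElem h.1] at this
        simp [this]
      rw [pegInner, if_pos h, ih (n + 1) (by omega), hdrop]
      simp [List.cons_prefix_cons]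
      split_ifs <;> simp <;> omega
    · rw [pegInner, if_neg h]
      rcases Nat.lt_or_ge n tokens.length with hl | hl
      · have hne : tokens[n]? ≠ some e := fun he => h ⟨hl, he⟩
        have hdrop : tokens.drop n = tokens[n] :: tokens.drop (n + 1) :=
          List.drop_eq_getElem_cons hl
        rw [hdrop, if_neg]
        rw [List.cons_prefix_cons]
        rintro ⟨heq, -⟩
        exact hne (by simp [List.getElem?_eq_getElem hl, heq])
      · have : tokens.drop n = [] := List.drop_eq_nil_iff.mpr hl
        simp [this]

theorem pegOuter_eq (grammar : List (List Int)) (tokens : List Int) (n : Nat)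
    (hn : n ≤ tokens.length) :
    (match pegOuter tokens n grammar with
     | none => false
     | some p => decide (p = tokens.length))
      = decide (grammar.flatMap id = tokens.drop n) := by
  induction grammar generalizing n with
  | nil =>
    simp only [pegOuter, List.flatMap_nil, decide_eq_decide]
    rw [eq_comm (b := tokens.drop n), List.drop_eq_nil_iff]
    omega
  | cons rule rest ih =>
    rw [pegOuter, pegInner_eq rule tokens n hn]
    by_cases h : rule <+: tokens.drop n
    · obtain ⟨t, ht⟩ := h
      have hlen : rule.length + t.length = tokens.length - n := by
        have := congrArg List.length ht
        simp [List.length_drop] at this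
        omega
      have ht' : tokens.drop (n + rule.length) = t := by
        have := congrArg (List.drop rule.length) ht
        symm
        simpa [List.drop_append, List.drop_drop, Nat.add_comm] using this
      rw [if_pos ⟨t, ht⟩, ih (n + rule.length) (by omega)]
      simp only [List.flatMap_cons, id, decide_eq_decide]
      rw [ht', ← ht, List.append_cancel_left_eq]
    · rw [if_neg h]
      simp only [List.flatMap_cons, id]
      rw [eq_comm (a := (false : Bool)), decide_eq_false_iff_not]
      intro heq
      exact h ⟨rest.flatMap id, heq⟩

-- ===== VERDICT (by name: the statement is the Claim_ definition above) =====
theorem peg_parse_spec : Claim_equal_peg_parse := by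

  intro tokens grammar _
  unfold Spec_peg_parse peg_parse peg_parse_alt
  have := pegOuter_eq grammar tokens 0 (Nat.zero_le _)
  simpa using this
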